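-- pv_equiv track=rewrite | github.com/shamus-li/gtop | gtop/__init__.py | _tokenize_constraint
-- ===== SOURCE A (Python) =====
-- from typing import Any, Dict, List, Optional, Set, Tuple
--
-- def _tokenize_constraint(expr: str) -> List[str]:
--     tokens: List[str] = []
--     i = 0
--     length = len(expr)
--
--     while i < length:
--         ch = expr[i]
--         if ch.isspace():
--             i += 1
--             continue
--         if ch in "()&|":
--             tokens.append(ch)
--             i += 1
--             continue
--         if ch == "[":
--             tokens.append("(")
--             i += 1
--             continue
--         if ch == "]":
--             tokens.append(")")
--             i += 1
--             continue
--
--         start = i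
--         while i < length and expr[i] not in "()&|[] " and not expr[i].isspace():
--             i += 1
--         tokens.append(expr[start:i])
--
--     return tokens
-- ===== SOURCE B (Python) =====
-- from typing import List
--
-- def _tokenize_constraint(expr: str) -> List[str]:
--     tokens: List[str] = []
--     cur: List[str] = []
--     for ch in expr:
--         if ch.isspace() or ch in "()&|[]":
--             if cur:
--                 tokens.append("".join(cur))
--                 cur = []
--             if ch == "[":
--                 tokens.append("(")
--             elif ch == "]":
--                 tokens.append(")")
--             elif ch in "()&|":
--                 tokens.append(ch)
--         else:
--             cur.append(ch)
--     if cur: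
--         tokens.append("".join(cur))
--     return tokens
-- ===== Notes on version B (the rewrite author's own statement) =====
-- stated objective: simpler
-- what changed: Replaced A's index-driven while loop with an inner run-scanning loop and slicing by a single for-loop over the characters that maintains a pending-word accumulator flushed at separators.
import Mathlib
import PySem

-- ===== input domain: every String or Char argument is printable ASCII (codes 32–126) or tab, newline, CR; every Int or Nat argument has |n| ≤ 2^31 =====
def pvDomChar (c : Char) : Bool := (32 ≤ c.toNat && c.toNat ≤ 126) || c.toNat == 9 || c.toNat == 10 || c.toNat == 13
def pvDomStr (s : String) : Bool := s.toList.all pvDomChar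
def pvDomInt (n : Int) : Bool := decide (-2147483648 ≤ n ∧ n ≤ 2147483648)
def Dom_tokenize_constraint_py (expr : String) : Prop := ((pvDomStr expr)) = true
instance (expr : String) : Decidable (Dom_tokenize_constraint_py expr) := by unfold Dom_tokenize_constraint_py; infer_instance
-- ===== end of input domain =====

-- B replaces A's index-driven while loop (with its inner run-scanning loop and slicing) by a
-- single pass that maintains a pending-word accumulator flushed at separators; objective: simpler.

-- ===== PORT A =====
-- A's inner while loop: scan the run of characters not in "()&|[] " and not whitespace;
-- returns (run, rest).  `ch in "()&|[] "` is ported as membership in the list of its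
-- characters (exact, since ch is a single character).
def tokARun : List Char → List Char × List Char
  | [] => ([], [])
  | c :: rest =>
    if ['(', ')', '&', '|', '[', ']', ' '].contains c || PySem.Chars.isspace c then ([], c :: rest)
    else
      let p := tokARun rest
      (c :: p.1, p.2)

-- needed by tokALoop's termination (cited in its decreasing_by)
theorem tokARun_snd_le (l : List Char) : (tokARun l).2.length ≤ l.length := by
  induction l with
  | nil => simp [tokARun]
  | cons c rest ih =>
    simp only [tokARun]
    split
    · simp
    · exact le_trans ih (Nat.le_succ _)

-- A's outer while loop, one step per examined character, branches in A's order
def tokALoop : List Char → List String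
  | [] => []
  | c :: rest =>
    if PySem.Chars.isspace c then tokALoop rest
    else if ['(', ')', '&', '|'].contains c then String.ofList [c] :: tokALoop rest
    else if c = '[' then "(" :: tokALoop rest
    else if c = ']' then ")" :: tokALoop rest
    else
      -- expr[start:i] = c followed by the run the inner loop scanned
      let p := tokARun rest
      String.ofList (c :: p.1) :: tokALoop p.2
  termination_by l => l.length
  decreasing_by
    all_goals simp
    exact tokARun_snd_le rest

def tokenize_constraint_py (expr : String) : List String := tokALoop expr.toList

-- ===== PORT B =====
-- B's separator test: whitespace or one of the special characters
def tokBSep (c : Char) : Bool := PySem.Chars.isspace c || ['(', ')', '&', '|', '[', ']'].contains c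

-- one step of B's for-loop over the characters: state = (tokens so far, pending word)
def tokBStep (st : List String × List Char) (c : Char) : List String × List Char :=
  if tokBSep c then
    let t1 := if st.2.isEmpty then st.1 else st.1 ++ [String.ofList st.2]
    let t2 := if c = '[' then t1 ++ ["("]
      else if c = ']' then t1 ++ [")"]
      else if ['(', ')', '&', '|'].contains c then t1 ++ [String.ofList [c]]
      else t1
    (t2, [])
  else (st.1, st.2 ++ [c])

def tokenize_constraint_py_alt (expr : String) : List String :=
  let st := expr.toList.foldl tokBStep ([], [])
  if st.2.isEmpty then st.1 else st.1 ++ [String.ofList st.2]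

-- ===== PRECONDITION & SPEC =====
def Spec_tokenize_constraint_py (expr : String) (out : List String) : Prop := out = tokenize_constraint_py_alt expr
instance (expr : String) (out : List String) : Decidable (Spec_tokenize_constraint_py expr out) := by unfold Spec_tokenize_constraint_py; infer_instance

-- ===== CLAIM (what is proved, stated in full; the proofs are below) =====
def Claim_equal_tokenize_constraint_py : Prop := ∀ (expr : String), Dom_tokenize_constraint_py expr → Spec_tokenize_constraint_py expr (tokenize_constraint_py expr)

-- ===== LEMMAS AND PROOFS =====

-- flush the pending word (B's "if cur: tokens.append(''.join(cur))")
def tokFlush (cur : List Char) : List String := if cur.isEmpty then [] else [String.ofList cur]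

-- token(s) emitted by B for a separator character
def tokEmit (c : Char) : List String :=
  if c = '[' then ["("] else if c = ']' then [")"]
  else if ['(', ')', '&', '|'].contains c then [String.ofList [c]] else []

-- what B produces from the remaining input given a pending word
def tokPend (pre : List Char) : List Char → List String
  | [] => tokFlush pre
  | c :: rest =>
    if tokBSep c then tokFlush pre ++ tokEmit c ++ tokPend [] rest
    else tokPend (pre ++ [c]) rest

-- the two separator tests agree (' ' is whitespace)
theorem sep_eq (c : Char) :
    (['(', ')', '&', '|', '[', ']', ' '].contains c || PySem.Chars.isspace c) = tokBSep c := by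
  unfold tokBSep
  have hsp : c = ' ' → PySem.Chars.isspace c = true := by rintro rfl; decide
  rw [Bool.eq_iff_iff]
  simp only [Bool.or_eq_true, List.contains_eq_mem, decide_eq_true_eq, List.mem_cons,
    List.not_mem_nil, or_false]
  tauto

theorem tokARun_sep (c : Char) (rest : List Char) (hs : tokBSep c = true) :
    tokARun (c :: rest) = ([], c :: rest) := by
  rw [tokARun, sep_eq c, hs]
  simp

theorem tokARun_nonsep (c : Char) (rest : List Char) (hs : tokBSep c = false) :
    tokARun (c :: rest) = (c :: (tokARun rest).1, (tokARun rest).2) := by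
  rw [tokARun, sep_eq c, hs]
  simp

theorem tokBStep_sep (toks : List String) (cur : List Char) (c : Char) (hs : tokBSep c = true) :
    tokBStep (toks, cur) c = (toks ++ tokFlush cur ++ tokEmit c, []) := by
  simp only [tokBStep, hs, if_pos, tokFlush, tokEmit]
  split_ifs <;> simp

theorem tokBStep_nonsep (toks : List String) (cur : List Char) (c : Char) (hs : tokBSep c = false) :
    tokBStep (toks, cur) c = (toks, cur ++ [c]) := by
  simp [tokBStep, hs]

-- loop invariant for B's fold
theorem tokBStep_invariant (l : List Char) : ∀ (toks : List String) (cur : List Char),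
    (let st := l.foldl tokBStep (toks, cur);
     if st.2.isEmpty then st.1 else st.1 ++ [String.ofList st.2]) = toks ++ tokPend cur l := by
  induction l with
  | nil =>
    intro toks cur
    simp only [List.foldl_nil, tokPend, tokFlush]
    split <;> simp
  | cons c rest ih =>
    intro toks cur
    simp only [List.foldl_cons, tokPend]
    cases hs : tokBSep c with
    | true =>
      rw [tokBStep_sep toks cur c hs, ih]
      simp
    | false =>
      rw [tokBStep_nonsep toks cur c hs, ih]
      simp

-- the run scanned by A's inner loop, flushed, followed by A's tokens of the rest, is A's tokens
theorem tokARun_flush (l : List Char) :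
    tokFlush (tokARun l).1 ++ tokALoop (tokARun l).2 = tokALoop l := by
  match l with
  | [] => simp [tokARun, tokFlush]
  | c :: rest =>
    cases hs : tokBSep c with
    | true =>
      rw [tokARun_sep c rest hs]
      simp [tokFlush]
    | false =>
      have h6 : c ∉ ['(', ')', '&', '|', '[', ']'] := by
        intro hm
        rw [tokBSep] at hs
        simp [List.contains_eq_mem, hm] at hs
      have hsp : PySem.Chars.isspace c = false := by
        rw [tokBSep] at hs
        cases h : PySem.Chars.isspace c
        · rfl
        · simp [h] at hs
      have hnc : ['(', ')', '&', '|'].contains c = false := by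
        simp only [List.contains_eq_mem, decide_eq_false_iff_not]
        intro h
        apply h6
        fin_cases h <;> simp
      have hb1 : c ≠ '[' := by rintro rfl; exact h6 (by simp)
      have hb2 : c ≠ ']' := by rintro rfl; exact h6 (by simp)
      have hp : ¬(c = '(' ∨ c = ')' ∨ c = '&' ∨ c = '|') := by
        rintro (rfl | rfl | rfl | rfl) <;> exact h6 (by simp)
      rw [tokARun_nonsep c rest hs]
      symm
      rw [tokALoop]
      simp [hsp, hp, hb1, hb2, tokFlush]

-- a separator step of B emits exactly what A's corresponding branch appends
theorem tokEmit_cons (c : Char) (rest : List Char) (hs : tokBSep c = true) :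
    tokEmit c ++ tokALoop rest = tokALoop (c :: rest) := by
  unfold tokEmit
  by_cases h1 : c = '['
  · subst h1
    symm
    rw [tokALoop]
    simp [(by decide : PySem.Chars.isspace '[' = false)]
  · by_cases h2 : c = ']'
    · subst h2
      symm
      rw [tokALoop]
      simp [(by decide : PySem.Chars.isspace ']' = false)]
    · by_cases hc : ['(', ')', '&', '|'].contains c = true
      · have hm : c ∈ ['(', ')', '&', '|'] := by simpa [List.contains_eq_mem] using hc
        have hsp : PySem.Chars.isspace c = false := by fin_cases hm <;> decide
        have hp : c = '(' ∨ c = ')' ∨ c = '&' ∨ c = '|' := by simpa using hm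
        symm
        rw [tokALoop]
        simp [hsp, hp, h1, h2]
      · have hsp : PySem.Chars.isspace c = true := by
          rcases Bool.or_eq_true_iff.1 hs with h | h
          · exact h
          · exfalso
            have hm : c ∈ ['(', ')', '&', '|', '[', ']'] := by
              simpa [List.contains_eq_mem] using h
            fin_cases hm <;> simp_all
        have hp : ¬(c = '(' ∨ c = ')' ∨ c = '&' ∨ c = '|') := by
          intro h
          apply hc
          simp only [List.contains_eq_mem, decide_eq_true_eq, List.mem_cons, List.not_mem_nil,
            or_false]
          exact h
        symm
        rw [tokALoop]
        simp [hsp, h1, h2]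
        tauto

-- B's pending-word recursion computes A's run-then-recurse tokens
theorem tokPend_eq (l : List Char) : ∀ (pre : List Char),
    tokPend pre l = tokFlush (pre ++ (tokARun l).1) ++ tokALoop (tokARun l).2 := by
  induction l with
  | nil =>
    intro pre
    simp only [tokPend, tokARun]
    rw [tokALoop]
    simp
  | cons c rest ih =>
    intro pre
    simp only [tokPend]
    cases hs : tokBSep c with
    | true =>
      simp only [if_pos]
      rw [tokARun_sep c rest hs, ih []]
      simp only [List.nil_append]
      rw [tokARun_flush rest, List.append_assoc, tokEmit_cons c rest hs]
      simp
    | false =>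
      simp only [Bool.false_eq_true, if_neg, not_false_iff]
      rw [tokARun_nonsep c rest hs, ih (pre ++ [c])]
      simp

-- ===== VERDICT (by name: the statement is the Claim_ definition above) =====
theorem tokenize_constraint_py_spec : Claim_equal_tokenize_constraint_py := by
  intro expr _
  unfold Spec_tokenize_constraint_py tokenize_constraint_py tokenize_constraint_py_alt
  rw [tokBStep_invariant expr.toList [] []]
  rw [tokPend_eq expr.toList []]
  simp only [List.nil_append]
  exact (tokARun_flush expr.toList).symm
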